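-- pv_equiv track=rewrite | github.com/KNeerajSai/Knowledge_Base_Demo | healthcare_data_pipeline.py | _extract_metadata_from_path
-- ===== SOURCE A (Python) =====
-- def _extract_metadata_from_path(pdf_path: str) -> tuple:
--     """Extract payer name and document type from file path"""
--     path_parts = pdf_path.split('/')
--
--     # Try to identify payer from path
--     payer_name = "Unknown Payer"
--     doc_type = "provider_document"
--
--     for part in path_parts:
--         part_lower = part.lower()
--         if 'countycare' in part_lower:
--             payer_name = "CountyCare Health Plan"
--         elif 'unitedhealthcare' in part_lower or 'uhc' in part_lower:
--             payer_name = "United Healthcare"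
--         elif 'anthem' in part_lower:
--             payer_name = "Anthem/Elevance Health"
--         elif 'aetna' in part_lower:
--             payer_name = "Aetna/CVS Health"
--         elif 'cigna' in part_lower:
--             payer_name = "Cigna Healthcare"
--
--         # Document type detection
--         if 'manual' in part_lower:
--             doc_type = "provider_manual"
--         elif 'prior' in part_lower and 'auth' in part_lower:
--             doc_type = "prior_authorization"
--         elif 'newsletter' in part_lower:
--             doc_type = "newsletter"
--         elif 'form' in part_lower:
--             doc_type = "form"
--
--     return payer_name, doc_type
-- ===== SOURCE B (Python) =====
-- _PAYER_RULES = [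
--     (("countycare",), "CountyCare Health Plan"),
--     (("unitedhealthcare",), "United Healthcare"),
--     (("uhc",), "United Healthcare"),
--     (("anthem",), "Anthem/Elevance Health"),
--     (("aetna",), "Aetna/CVS Health"),
--     (("cigna",), "Cigna Healthcare"),
-- ]
--
-- _DOC_RULES = [
--     (("manual",), "provider_manual"),
--     (("prior", "auth"), "prior_authorization"),
--     (("newsletter",), "newsletter"),
--     (("form",), "form"),
-- ]
--
--
-- def _first_rule_value(rules, parts_rev, default):
--     """First rule value matched by any part, scanning parts last-to-first."""
--     for part in parts_rev:
--         for keywords, value in rules: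
--             if all(k in part for k in keywords):
--                 return value
--     return default
--
--
-- def _extract_metadata_from_path(pdf_path: str) -> tuple:
--     """Extract payer name and document type from file path."""
--     parts_rev = [p.lower() for p in reversed(pdf_path.split('/'))]
--     return (_first_rule_value(_PAYER_RULES, parts_rev, "Unknown Payer"),
--             _first_rule_value(_DOC_RULES, parts_rev, "provider_document"))
-- ===== Notes on version B (the rewrite author's own statement) =====
-- stated objective: alternative
-- what changed: Replaced A's single forward loop with hard-coded if/elif chains overwriting two accumulators by a data-driven design: two declarative rule tables (required-substrings -> value) consumed by one generic first-match search over the reversed, lowercased path parts.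
import Mathlib
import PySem

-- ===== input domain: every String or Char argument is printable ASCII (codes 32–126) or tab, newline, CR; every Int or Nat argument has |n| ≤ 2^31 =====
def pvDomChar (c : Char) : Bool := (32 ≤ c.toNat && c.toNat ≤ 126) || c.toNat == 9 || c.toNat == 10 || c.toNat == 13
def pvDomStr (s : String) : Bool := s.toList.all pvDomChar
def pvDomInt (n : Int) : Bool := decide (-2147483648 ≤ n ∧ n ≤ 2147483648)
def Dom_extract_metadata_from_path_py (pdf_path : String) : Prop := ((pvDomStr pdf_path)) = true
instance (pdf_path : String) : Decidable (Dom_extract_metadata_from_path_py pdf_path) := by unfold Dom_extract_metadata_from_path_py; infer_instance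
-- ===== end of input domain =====

-- B replaces A's forward loop of hard-coded if/elif chains by two declarative rule
-- tables (required substrings -> value) and one generic first-match search over the
-- reversed lowercased parts; objective: alternative, data-driven decomposition.

-- ===== PORT A =====
-- loop body of A: updates (payer_name, doc_type) from one path part
def pvStepA (st : String × String) (part : String) : String × String :=
  let part_lower := PySem.Str.lower part
  let payer_name :=
    if PySem.Str.isIn "countycare" part_lower then "CountyCare Health Plan"
    else if PySem.Str.isIn "unitedhealthcare" part_lower || PySem.Str.isIn "uhc" part_lower then "United Healthcare"
    else if PySem.Str.isIn "anthem" part_lower then "Anthem/Elevance Health"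
    else if PySem.Str.isIn "aetna" part_lower then "Aetna/CVS Health"
    else if PySem.Str.isIn "cigna" part_lower then "Cigna Healthcare"
    else st.1
  let doc_type :=
    if PySem.Str.isIn "manual" part_lower then "provider_manual"
    else if PySem.Str.isIn "prior" part_lower && PySem.Str.isIn "auth" part_lower then "prior_authorization"
    else if PySem.Str.isIn "newsletter" part_lower then "newsletter"
    else if PySem.Str.isIn "form" part_lower then "form"
    else st.2
  (payer_name, doc_type)

def extract_metadata_from_path_py (pdf_path : String) : String × String :=
  let path_parts := (PySem.Str.split? pdf_path "/").getD []
  List.foldl pvStepA ("Unknown Payer", "provider_document") path_parts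

-- ===== PORT B =====
-- declarative rule tables: (required substrings, resulting value)
def pvPayerRules : List (List String × String) :=
  [(["countycare"], "CountyCare Health Plan"),
   (["unitedhealthcare"], "United Healthcare"),
   (["uhc"], "United Healthcare"),
   (["anthem"], "Anthem/Elevance Health"),
   (["aetna"], "Aetna/CVS Health"),
   (["cigna"], "Cigna Healthcare")]

def pvDocRules : List (List String × String) :=
  [(["manual"], "provider_manual"),
   (["prior", "auth"], "prior_authorization"),
   (["newsletter"], "newsletter"),
   (["form"], "form")]

-- value of the first rule all of whose keywords occur in the part
def pvMatchRules (rules : List (List String × String)) (part : String) : Option String :=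
  rules.findSome? (fun r => if r.1.all (fun k => PySem.Str.isIn k part) then some r.2 else none)

-- first rule value matched by any part (parts already in scan order)
def pvFirstRuleValue (rules : List (List String × String)) (parts_rev : List String) (dflt : String) : String :=
  (parts_rev.findSome? (pvMatchRules rules)).getD dflt

def extract_metadata_from_path_py_alt (pdf_path : String) : String × String :=
  let parts_rev := (((PySem.Str.split? pdf_path "/").getD []).reverse).map PySem.Str.lower
  (pvFirstRuleValue pvPayerRules parts_rev "Unknown Payer",
   pvFirstRuleValue pvDocRules parts_rev "provider_document")

-- ===== PRECONDITION & SPEC =====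
def Spec_extract_metadata_from_path_py (pdf_path : String) (out : String × String) : Prop := out = extract_metadata_from_path_py_alt pdf_path
instance (pdf_path : String) (out : String × String) : Decidable (Spec_extract_metadata_from_path_py pdf_path out) := by unfold Spec_extract_metadata_from_path_py; infer_instance

-- ===== CLAIM (what is proved, stated in full; the proofs are below) =====
def Claim_equal_extract_metadata_from_path_py : Prop := ∀ (pdf_path : String), Dom_extract_metadata_from_path_py pdf_path → Spec_extract_metadata_from_path_py pdf_path (extract_metadata_from_path_py pdf_path)

-- ===== LEMMAS AND PROOFS =====

-- proof-side classifiers: A's two if/elif chains as Option-valued functions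
def pvPayerOf (part_lower : String) : Option String :=
  if PySem.Str.isIn "countycare" part_lower then some "CountyCare Health Plan"
  else if PySem.Str.isIn "unitedhealthcare" part_lower || PySem.Str.isIn "uhc" part_lower then some "United Healthcare"
  else if PySem.Str.isIn "anthem" part_lower then some "Anthem/Elevance Health"
  else if PySem.Str.isIn "aetna" part_lower then some "Aetna/CVS Health"
  else if PySem.Str.isIn "cigna" part_lower then some "Cigna Healthcare"
  else none

def pvDocTypeOf (part_lower : String) : Option String :=
  if PySem.Str.isIn "manual" part_lower then some "provider_manual"
  else if PySem.Str.isIn "prior" part_lower && PySem.Str.isIn "auth" part_lower then some "prior_authorization"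
  else if PySem.Str.isIn "newsletter" part_lower then some "newsletter"
  else if PySem.Str.isIn "form" part_lower then some "form"
  else none

-- the payer rule table matches exactly as A's payer if/elif chain
theorem matchRules_payer (p : String) : pvMatchRules pvPayerRules p = pvPayerOf p := by
  simp only [pvMatchRules, pvPayerRules, pvPayerOf, List.findSome?, List.all_cons, List.all_nil,
    Bool.and_true]
  split_ifs <;> simp_all

-- the doc-type rule table matches exactly as A's doc-type if/elif chain
theorem matchRules_doc (p : String) : pvMatchRules pvDocRules p = pvDocTypeOf p := by
  simp only [pvMatchRules, pvDocRules, pvDocTypeOf, List.findSome?, List.all_cons, List.all_nil,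
    Bool.and_true]
  split_ifs <;> simp_all

-- A's loop body, factored through the two Option-valued classifiers
theorem pvStepA_eq (st : String × String) (part : String) :
    pvStepA st part = ((pvPayerOf (PySem.Str.lower part)).getD st.1,
                       (pvDocTypeOf (PySem.Str.lower part)).getD st.2) := by
  unfold pvStepA pvPayerOf pvDocTypeOf
  dsimp only
  split_ifs <;> rfl

-- accumulating "last match wins" fold = first match on the reversed list
theorem foldl_getD_eq_findSome_reverse {α β : Type} (f : α → Option β) (xs : List α) (init : β) :
    xs.foldl (fun acc x => (f x).getD acc) init = (xs.reverse.findSome? f).getD init := by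
  induction xs generalizing init with
  | nil => rfl
  | cons x xs ih =>
      simp only [List.foldl_cons, ih, List.reverse_cons, List.findSome?_append]
      cases h : xs.reverse.findSome? f <;> cases hfx : f x <;>
        simp [List.findSome?, hfx]

theorem foldl_pair_split (xs : List String) (p d : String) :
    xs.foldl pvStepA (p, d) =
      (xs.foldl (fun acc x => (pvPayerOf (PySem.Str.lower x)).getD acc) p,
       xs.foldl (fun acc x => (pvDocTypeOf (PySem.Str.lower x)).getD acc) d) := by
  induction xs generalizing p d with
  | nil => rfl
  | cons x xs ih => simp only [List.foldl_cons, pvStepA_eq, ih]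

theorem findSome?_map_comp {α β γ : Type} (g : α → β) (f : β → Option γ) (l : List α) :
    List.findSome? f (l.map g) = List.findSome? (fun x => f (g x)) l := by
  induction l with
  | nil => rfl
  | cons x xs ih => simp only [List.map_cons, List.findSome?, ih]

-- ===== VERDICT (by name: the statement is the Claim_ definition above) =====
theorem extract_metadata_from_path_py_spec : Claim_equal_extract_metadata_from_path_py := by
  intro pdf_path _
  unfold Spec_extract_metadata_from_path_py
  simp only [extract_metadata_from_path_py, extract_metadata_from_path_py_alt, pvFirstRuleValue]
  rw [foldl_pair_split, foldl_getD_eq_findSome_reverse, foldl_getD_eq_findSome_reverse]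
  simp only [findSome?_map_comp, matchRules_payer, matchRules_doc]
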